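-- pv_equiv track=rewrite | github.com/ayushpatel-srijan/Smart-Narrative-PoC | app_2.py | remove_error_entries
-- ===== SOURCE A (Python) =====
-- def remove_error_entries(dictionary):
--     keys_to_remove = []
--     for key, value in dictionary.items():
--         if "ERROR" in value:
--             keys_to_remove.append(key)
--
--     for key in keys_to_remove:
--         del dictionary[key]
--
--     return dictionary
-- ===== SOURCE B (Python) =====
-- def remove_error_entries(dictionary):
--     # Drain the dict destructively onto an explicit stack (popitem pops from the
--     # end), then rebuild it entry-by-entry from the stack (restoring the original
--     # order), reinserting only entries whose value has no "ERROR".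
--     stack = []
--     while dictionary:
--         stack.append(dictionary.popitem())
--     while stack:
--         key, value = stack.pop()
--         if "ERROR" not in value:
--             dictionary[key] = value
--     return dictionary
-- ===== Notes on version B (the rewrite author's own statement) =====
-- stated objective: alternative
-- what changed: B drains the dict destructively with popitem onto an explicit stack and rebuilds the same dict entry-by-entry from the stack (filtering on reinsertion), instead of A's collect-keys-then-delete two-pass scheme.
import Mathlib
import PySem

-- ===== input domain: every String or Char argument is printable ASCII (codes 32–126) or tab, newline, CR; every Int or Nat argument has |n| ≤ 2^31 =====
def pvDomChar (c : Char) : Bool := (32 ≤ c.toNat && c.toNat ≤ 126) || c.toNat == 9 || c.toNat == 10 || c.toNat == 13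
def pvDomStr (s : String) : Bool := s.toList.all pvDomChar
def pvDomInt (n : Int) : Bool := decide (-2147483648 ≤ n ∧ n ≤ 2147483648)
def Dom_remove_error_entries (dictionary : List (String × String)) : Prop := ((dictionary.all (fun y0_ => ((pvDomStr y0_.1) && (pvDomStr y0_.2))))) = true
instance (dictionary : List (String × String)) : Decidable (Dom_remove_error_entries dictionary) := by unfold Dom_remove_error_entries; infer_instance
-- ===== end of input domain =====

-- B replaces A's collect-keys-then-delete passes by a destructive popitem drain onto an explicit
-- stack followed by a filtered rebuild from the stack (both mutate the dict in place; the
-- equivalence proved is about the returned value).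
-- ===== PORT A =====
-- keys_to_remove loop: for key, value in dictionary.items(): if "ERROR" in value: keys_to_remove.append(key)
def removeErrorKeysToRemove (dictionary : List (String × String)) : List String :=
  dictionary.foldl (fun acc p => if PySem.Str.isIn "ERROR" p.2 then acc ++ [p.1] else acc) []

-- del dictionary[key] on an assoc list with unique keys = remove the (single) entry with that key
def remove_error_entries (dictionary : List (String × String)) : List (String × String) :=
  (removeErrorKeysToRemove dictionary).foldl
    (fun d key => d.eraseP (fun p => p.1 == key)) dictionary

-- ===== PORT B =====
-- dictionary[key] = value on a dict: overwrite in place if present, else append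
def dictSet (d : List (String × String)) (k v : String) : List (String × String) :=
  if d.any (fun p => p.1 == k) then d.map (fun p => if p.1 == k then (k, v) else p)
  else d ++ [(k, v)]

-- while dictionary: stack.append(dictionary.popitem())   (popitem pops the LAST entry)
def drainStack (d stack : List (String × String)) : List (String × String) :=
  if h : d = [] then stack
  else drainStack d.dropLast (stack ++ [d.getLast h])
termination_by d.length
decreasing_by have := List.length_pos_of_ne_nil h; simp [List.length_dropLast]; omega

-- while stack: key, value = stack.pop(); if "ERROR" not in value: dictionary[key] = value
def rebuildFromStack (stack acc : List (String × String)) : List (String × String) :=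
  if h : stack = [] then acc
  else
    let p := stack.getLast h
    rebuildFromStack stack.dropLast
      (if !(PySem.Str.isIn "ERROR" p.2) then dictSet acc p.1 p.2 else acc)
termination_by stack.length
decreasing_by have := List.length_pos_of_ne_nil h; simp [List.length_dropLast]; omega

def remove_error_entries_alt (dictionary : List (String × String)) : List (String × String) :=
  rebuildFromStack (drainStack dictionary []) []

-- ===== PRECONDITION & SPEC =====
-- Pre_ requires distinct keys: a Python dict cannot contain duplicate keys, so association lists
-- with a repeated key do not represent any input of the Python function.
def Pre_remove_error_entries (dictionary : List (String × String)) : Prop :=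
  (dictionary.map Prod.fst).Nodup
instance (dictionary : List (String × String)) : Decidable (Pre_remove_error_entries dictionary) := by
  unfold Pre_remove_error_entries; infer_instance
def pvWitness_remove_error_entries : (List (String × String)) :=
  [("a", "ok"), ("b", "ERROR x"), ("c", "fine")]

def Spec_remove_error_entries (dictionary : List (String × String)) (out : List (String × String)) : Prop := out = remove_error_entries_alt dictionary
instance (dictionary : List (String × String)) (out : List (String × String)) : Decidable (Spec_remove_error_entries dictionary out) := by unfold Spec_remove_error_entries; infer_instance

-- ===== CLAIM (what is proved, stated in full; the proofs are below) =====
def Claim_equal_remove_error_entries : Prop := ∀ (dictionary : List (String × String)), Dom_remove_error_entries dictionary → Pre_remove_error_entries dictionary → Spec_remove_error_entries dictionary (remove_error_entries dictionary)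

-- ===== LEMMAS AND PROOFS =====

-- keep-predicate shared by the characterisations
def pvKeep (p : String × String) : Bool := !(PySem.Str.isIn "ERROR" p.2)

-- ---- A-side characterisation: A = filter pvKeep (under Nodup keys) ----

theorem removeErrorKeysToRemove_eq (d : List (String × String)) :
    removeErrorKeysToRemove d
      = (d.filter (fun p => PySem.Str.isIn "ERROR" p.2)).map Prod.fst := by
  unfold removeErrorKeysToRemove
  simpa using PySem.List.foldl_append_if (fun p => PySem.Str.isIn "ERROR" p.2) Prod.fst d []

theorem eraseP_eq_filter_of_nodup (d : List (String × String)) (k : String)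
    (h : (d.map Prod.fst).Nodup) :
    d.eraseP (fun p => p.1 == k) = d.filter (fun p => !(p.1 == k)) := by
  induction d with
  | nil => simp
  | cons x xs ih =>
    simp only [List.map_cons, List.nodup_cons] at h
    by_cases hx : x.1 = k
    · subst hx
      rw [List.eraseP_cons_of_pos (by simp), List.filter_cons_of_neg (by simp)]
      symm
      apply List.filter_eq_self.mpr
      intro a ha
      simp only [Bool.not_eq_eq_eq_not, Bool.not_true, beq_eq_false_iff_ne, ne_eq]
      intro hak
      exact h.1 (hak ▸ List.mem_map_of_mem ha)
    · rw [List.eraseP_cons_of_neg (by simp [hx]), List.filter_cons_of_pos (by simp [hx]),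
        ih h.2]

theorem foldl_eraseP_eq_filter (L : List String) (d : List (String × String))
    (h : (d.map Prod.fst).Nodup) :
    L.foldl (fun d key => d.eraseP (fun p => p.1 == key)) d
      = d.filter (fun p => !(L.contains p.1)) := by
  induction L generalizing d with
  | nil => simp
  | cons k ks ih =>
    simp only [List.foldl_cons]
    rw [eraseP_eq_filter_of_nodup d k h, ih _ ?nd]
    case nd =>
      have := List.Sublist.map Prod.fst (List.filter_sublist (l := d) (p := fun p => !(p.1 == k)))
      exact this.nodup h
    rw [List.filter_filter]
    apply List.filter_congr
    intro p _
    by_cases hp : p.1 = k <;> simp [hp]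

theorem remove_error_entries_eq_filter (d : List (String × String))
    (h : (d.map Prod.fst).Nodup) :
    remove_error_entries d = d.filter pvKeep := by
  unfold remove_error_entries
  rw [removeErrorKeysToRemove_eq, foldl_eraseP_eq_filter _ _ h]
  apply List.filter_congr
  intro p hp
  have hs : (((d.filter (fun p => PySem.Str.isIn "ERROR" p.2)).map Prod.fst).contains p.1)
      = PySem.Str.isIn "ERROR" p.2 := by
    rcases hb : PySem.Str.isIn "ERROR" p.2 with _ | _
    · simp only [List.contains_eq_mem, decide_eq_false_iff_not, List.mem_map]
      rintro ⟨q, hq, hq1⟩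
      have hqd := List.mem_of_mem_filter hq
      have hqp : q = p := List.inj_on_of_nodup_map h hqd hp hq1
      have := (List.mem_filter.mp hq).2
      rw [hqp, hb] at this
      exact Bool.false_ne_true this
    · simp only [List.contains_eq_mem, decide_eq_true_eq, List.mem_map]
      exact ⟨p, List.mem_filter.mpr ⟨hp, hb⟩, rfl⟩
  show (!(((d.filter (fun p => PySem.Str.isIn "ERROR" p.2)).map Prod.fst).contains p.1)) = pvKeep p
  rw [hs, pvKeep]

-- ---- B-side characterisation ----

-- the drain loop reverses the dict onto the stack
theorem drainStack_eq (d : List (String × String)) :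
    ∀ s, drainStack d s = s ++ d.reverse := by
  induction d using List.reverseRecOn with
  | nil => intro s; rw [drainStack]; simp
  | append_singleton xs x ih =>
    intro s
    rw [drainStack]
    simp only [List.append_eq_nil_iff, List.cons_ne_self, and_false, reduceDIte,
      List.dropLast_concat, List.getLast_append_singleton]
    rw [ih]
    simp

-- the rebuild loop is a left fold over the reversed stack
theorem rebuildFromStack_eq (stack : List (String × String)) :
    ∀ acc, rebuildFromStack stack acc
      = stack.reverse.foldl
          (fun acc p => if pvKeep p then dictSet acc p.1 p.2 else acc) acc := by
  induction stack using List.reverseRecOn with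
  | nil => intro acc; rw [rebuildFromStack]; simp
  | append_singleton xs x ih =>
    intro acc
    rw [rebuildFromStack]
    simp only [List.append_eq_nil_iff, List.cons_ne_self, and_false, reduceDIte,
      List.dropLast_concat, List.getLast_append_singleton]
    rw [ih]
    simp only [List.reverse_append, List.reverse_cons, List.reverse_nil, List.nil_append,
      pvKeep, List.singleton_append, List.foldl_cons]
    rfl

-- setting a fresh key appends
theorem dictSet_of_fresh (acc : List (String × String)) (k v : String)
    (h : k ∉ acc.map Prod.fst) :
    dictSet acc k v = acc ++ [(k, v)] := by
  unfold dictSet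
  rw [if_neg]
  simp only [List.any_eq_true, beq_iff_eq, not_exists, not_and]
  intro p hp hpk
  exact h (hpk ▸ List.mem_map_of_mem hp)

-- inserting distinct, fresh keys one by one (filtered) = append the filtered list
theorem foldl_dictSet_fresh (d : List (String × String)) :
    ∀ acc, (d.map Prod.fst).Nodup → (∀ k ∈ acc.map Prod.fst, k ∉ d.map Prod.fst) →
    d.foldl (fun acc p => if pvKeep p then dictSet acc p.1 p.2 else acc) acc
      = acc ++ d.filter pvKeep := by
  induction d with
  | nil => intro acc _ _; simp
  | cons p ds ih =>
    intro acc hnd hdisj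
    simp only [List.map_cons, List.nodup_cons] at hnd
    have hfresh : p.1 ∉ acc.map Prod.fst := by
      intro hk
      exact hdisj p.1 hk (by simp)
    have hdisj' : ∀ k ∈ (if pvKeep p then dictSet acc p.1 p.2 else acc).map Prod.fst,
        k ∉ ds.map Prod.fst := by
      intro k hk
      by_cases hkeep : pvKeep p
      · rw [if_pos hkeep, dictSet_of_fresh acc p.1 p.2 hfresh] at hk
        simp only [List.map_append, List.mem_append, List.map_cons, List.mem_singleton,
          List.map_nil] at hk
        rcases hk with hk | hk
        · exact fun hm => hdisj k hk (List.mem_cons_of_mem _ hm)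
        · exact hk ▸ hnd.1
      · rw [if_neg hkeep] at hk
        exact fun hm => hdisj k hk (List.mem_cons_of_mem _ hm)
    simp only [List.foldl_cons]
    rw [ih _ hnd.2 hdisj']
    by_cases hkeep : pvKeep p
    · rw [if_pos hkeep, dictSet_of_fresh acc p.1 p.2 hfresh,
        List.filter_cons_of_pos hkeep]
      simp
    · rw [if_neg hkeep, List.filter_cons_of_neg (by simpa using hkeep)]

theorem remove_error_entries_alt_eq_filter (d : List (String × String))
    (h : (d.map Prod.fst).Nodup) :
    remove_error_entries_alt d = d.filter pvKeep := by
  unfold remove_error_entries_alt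
  rw [drainStack_eq, rebuildFromStack_eq]
  simp only [List.nil_append, List.reverse_reverse]
  simpa using foldl_dictSet_fresh d [] h (by simp)

-- ===== VERDICT (by name: the statement is the Claim_ definition above) =====
theorem remove_error_entries_spec : Claim_equal_remove_error_entries := by
  intro d _ hpre
  unfold Spec_remove_error_entries
  rw [remove_error_entries_eq_filter d hpre, remove_error_entries_alt_eq_filter d hpre]
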